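-- pv_equiv track=rewrite | github.com/Yvillia/discord-coderbot | src/function.py | check_multiples
-- ===== SOURCE A (Python) =====
-- def check_multiples(msg):
--     """
--     Check how many dice are being asked to be thrown
--
--     Parameters:
--     msg - discord.client.message object storing the received message
--
--     returns number of dice thrown
--     """
--     # Reverses String Before d
--     msg = msg.strip()
--     msg = msg[::-1]
--     i = 0
--     while i < len(msg) and msg[i].isdigit():
--         i += 1
--     if i == 0:
--         return -1  # If No Given Numbers Return -1
--     else:
--         # Reverses Again After Finding When the Numbers Stop
--         number_of_dice = int(msg[0:i][::-1])
--         return number_of_dice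
-- ===== SOURCE B (Python) =====
-- def check_multiples(msg):
--     """
--     Check how many dice are being asked to be thrown
--
--     Parameters:
--     msg - discord.client.message object storing the received message
--
--     returns number of dice thrown
--     """
--     # Walk the stripped message backwards, accumulating the trailing
--     # digit run with place-value arithmetic (no slicing, no re-parse).
--     s = msg.strip()
--     number = 0
--     place = 1
--     found = False
--     for ch in reversed(s):
--         if not ch.isdigit():
--             break
--         number += (ord(ch) - 48) * place
--         place *= 10
--         found = True
--     return number if found else -1
-- ===== Notes on version B (the rewrite author's own statement) =====
-- stated objective: alternative
-- what changed: B replaces A's reverse-slice, index-scan and int() re-parse of the digit substring with a single backward walk over the stripped string that accumulates the trailing digit run by place-value arithmetic (number += digit*place; place *= 10).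
import Mathlib
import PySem

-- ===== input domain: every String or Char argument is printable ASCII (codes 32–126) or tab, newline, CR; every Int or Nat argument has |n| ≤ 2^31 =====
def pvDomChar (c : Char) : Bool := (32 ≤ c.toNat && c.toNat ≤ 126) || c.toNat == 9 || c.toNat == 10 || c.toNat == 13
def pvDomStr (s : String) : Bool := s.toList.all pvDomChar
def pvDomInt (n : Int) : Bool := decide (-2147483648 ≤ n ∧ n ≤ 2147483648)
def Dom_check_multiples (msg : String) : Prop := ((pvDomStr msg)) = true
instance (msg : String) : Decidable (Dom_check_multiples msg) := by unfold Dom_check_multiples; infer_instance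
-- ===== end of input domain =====

-- B walks the stripped message backwards once, accumulating the trailing digit run with
-- place-value arithmetic, instead of A's reverse-slice + digit-count + int() re-parse (alternative).

-- ===== PORT A =====

-- Python's int(s): hand-ported (PySem.Int.ofChars? is exact but proof-opaque); this fold is exact
-- for int() on the inputs this port's guarded call receives: nonempty strings of ASCII digits
-- (guaranteed by the isdigit while-loop and the i ≠ 0 branch).
def pyIntOfDigits (ds : List Char) : Int :=
  ds.foldl (fun a c => a * 10 + ((c.toNat : Int) - 48)) 0

-- the while loop `while i < len(msg) and msg[i].isdigit(): i += 1`
def whileA (cs : List Char) (i : Nat) : Nat :=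
  if h : i < cs.length then
    (if PySem.Chars.isdigit cs[i] then whileA cs (i + 1) else i)
  else i
termination_by cs.length - i

def check_multiples (msg : String) : Int :=
  let m0 := (PySem.Str.strip msg).toList                                 -- msg = msg.strip()
  let m := (PySem.List.slice? m0 none none (-1)).getD []                 -- msg = msg[::-1]
  let i := whileA m 0                                                    -- the while loop
  if i = 0 then -1                                                       -- if i == 0: return -1
  else                                                                   -- int(msg[0:i][::-1])
    pyIntOfDigits ((PySem.List.slice? (PySem.List.slice m (some 0) (some (i : Int))) none none (-1)).getD [])

-- ===== PORT B =====

-- the `for ch in reversed(s)` loop of Source B with its accumulator state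
def bLoop : List Char → Int → Int → Bool → Int
  | [], number, _, found => if found then number else -1
  | c :: rest, number, place, found =>
    if PySem.Chars.isdigit c then
      bLoop rest (number + ((c.toNat : Int) - 48) * place) (place * 10) true
    else if found then number else -1

def check_multiples_alt (msg : String) : Int :=
  bLoop ((PySem.Str.strip msg).toList.reverse) 0 1 false

-- ===== PRECONDITION & SPEC =====
def Spec_check_multiples (msg : String) (out : Int) : Prop := out = check_multiples_alt msg
instance (msg : String) (out : Int) : Decidable (Spec_check_multiples msg out) := by unfold Spec_check_multiples; infer_instance

-- ===== CLAIM (what is proved, stated in full; the proofs are below) =====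
def Claim_equal_check_multiples : Prop := ∀ (msg : String), Dom_check_multiples msg → Spec_check_multiples msg (check_multiples msg)

-- ===== LEMMAS AND PROOFS =====

-- value of a digit run given least-significant-first
def vLSD : List Char → Int
  | [] => 0
  | c :: rest => ((c.toNat : Int) - 48) + 10 * vLSD rest

theorem whileA_spec (cs : List Char) (i : Nat) :
    whileA cs i = i + ((cs.drop i).takeWhile PySem.Chars.isdigit).length := by
  rw [whileA]
  split
  · next h =>
    rw [List.drop_eq_getElem_cons h]
    split
    · next hd =>
      rw [whileA_spec cs (i + 1), List.takeWhile_cons_of_pos hd]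
      simp; omega
    · next hd =>
      rw [List.takeWhile_cons_of_neg (by simp [hd])]
      simp
  · next h =>
    rw [List.drop_eq_nil_of_le (by omega)]
    simp
termination_by cs.length - i

theorem bLoop_spec (cs : List Char) (n p : Int) (f : Bool) :
    bLoop cs n p f =
      if (cs.takeWhile PySem.Chars.isdigit) = [] then (if f then n else -1)
      else n + p * vLSD (cs.takeWhile PySem.Chars.isdigit) := by
  induction cs generalizing n p f with
  | nil => simp [bLoop]
  | cons c rest ih =>
    by_cases hd : PySem.Chars.isdigit c
    · rw [List.takeWhile_cons_of_pos hd]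
      simp only [bLoop, hd, if_true, reduceCtorEq, if_false, ih, vLSD]
      split
      · next he => rw [he]; simp [vLSD]; ring
      · ring
    · rw [List.takeWhile_cons_of_neg (by simp [hd])]
      simp [bLoop, hd]

theorem pyIntOfDigits_reverse (ds : List Char) : pyIntOfDigits ds.reverse = vLSD ds := by
  induction ds with
  | nil => simp [pyIntOfDigits, vLSD]
  | cons c rest ih =>
    simp only [List.reverse_cons, pyIntOfDigits, List.foldl_append, List.foldl_cons,
      List.foldl_nil, vLSD] at *
    rw [ih]; ring

-- ===== VERDICT (by name: the statement is the Claim_ definition above) =====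
theorem check_multiples_spec : Claim_equal_check_multiples := by
  intro msg _
  unfold Spec_check_multiples check_multiples check_multiples_alt
  simp only [PySem.List.slice?_none_none_neg_one, Option.getD_some]
  generalize (PySem.Str.strip msg).toList.reverse = m
  rw [bLoop_spec, whileA_spec]
  simp only [List.drop_zero, Nat.zero_add]
  have htw := List.prefix_iff_eq_take.mp
    (List.takeWhile_prefix (l := m) (p := PySem.Chars.isdigit))
  by_cases h : List.takeWhile PySem.Chars.isdigit m = []
  · rw [if_pos h, if_pos (by simp [h])]; simp
  · rw [if_neg h, if_neg (by simpa [List.length_eq_zero_iff] using h)]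
    rw [PySem.List.slice_zero_start, PySem.List.slice_to_natCast, ← htw, pyIntOfDigits_reverse]
    ring
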